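-- pv_equiv track=rewrite | github.com/OneWizzardBoi/SYS824 | 3D/obstacle_avoidance.py | seperate_jacobian_segments
-- ===== SOURCE A (Python) =====
-- def seperate_jacobian_segments(dhp_matrix):
--
--     ''' Returns the row indicies associated whith each robot segment '''
--
--     row_i = 0
--     segment_i = 0
--     segment_indicies = {}
--
--     # getting a list of the DHP (d) parameters
--     d_params = [dhp_row[-1] for dhp_row in dhp_matrix]
--
--     for row_i in range(len(d_params)):
--
--         if row_i == 0: segment_indicies[str(segment_i)] = []
--
--         if (not d_params[row_i] == 0) and (not row_i == 0) :
--             segment_i += 1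
--             segment_indicies[str(segment_i)] = []
--             segment_indicies[str(segment_i)].append(row_i)
--
--         else: segment_indicies[str(segment_i)].append(row_i)
--
--     return segment_indicies
-- ===== SOURCE B (Python) =====
-- def seperate_jacobian_segments(dhp_matrix):
--
--     ''' Returns the row indicies associated whith each robot segment '''
--
--     # boundary-first: find the start index of every segment, then emit
--     # each segment as a contiguous index range
--     d_params = [dhp_row[-1] for dhp_row in dhp_matrix]
--     n = len(d_params)
--     if n == 0:
--         return {}
--     starts = [i for i in range(n) if i == 0 or d_params[i] != 0]
--     return {
--         str(seg): list(range(s, starts[seg + 1] if seg + 1 < len(starts) else n))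
--         for seg, s in enumerate(starts)
--     }
-- ===== Notes on version B (the rewrite author's own statement) =====
-- stated objective: alternative
-- what changed: Replaces the stateful row-by-row dict-appending loop (segment counter plus append to the current segment's list) by a boundary-first decomposition: one pass collects segment start indices, then each segment is emitted directly as the contiguous index range between consecutive starts.
import Mathlib
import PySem

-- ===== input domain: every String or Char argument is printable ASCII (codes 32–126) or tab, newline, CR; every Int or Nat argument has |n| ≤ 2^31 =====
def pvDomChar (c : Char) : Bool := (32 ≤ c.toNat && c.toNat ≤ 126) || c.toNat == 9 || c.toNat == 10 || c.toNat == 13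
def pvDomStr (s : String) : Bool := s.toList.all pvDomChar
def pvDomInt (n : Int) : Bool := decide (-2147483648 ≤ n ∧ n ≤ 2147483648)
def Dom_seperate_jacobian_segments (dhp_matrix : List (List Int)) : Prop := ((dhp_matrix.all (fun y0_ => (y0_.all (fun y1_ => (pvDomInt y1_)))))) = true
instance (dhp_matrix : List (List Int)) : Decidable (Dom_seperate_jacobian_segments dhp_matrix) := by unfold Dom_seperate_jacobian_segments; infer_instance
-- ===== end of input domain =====

-- B groups the row indices boundary-first (collect segment starts, then emit each
-- segment as a contiguous range) instead of A's stateful row-by-row dict appending;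
-- objective: alternative decomposition, same O(n) cost.

-- ===== PORT A =====
-- A-side helper: the body of A's for-loop (state = (segment_i, segment_indicies))
def pvStepA (d_params : List Int) (st : Int × PySem.Dict String (List Int)) (row_i : Int) :
    Int × PySem.Dict String (List Int) :=
  let segment_i := st.1
  let segment_indicies := st.2
  let segment_indicies :=
    if row_i == 0 then segment_indicies.insert (PySem.Int.toStr segment_i) [] else segment_indicies
  if (!(PySem.List.pyGetD d_params row_i 0 == 0)) && (!(row_i == 0)) then
    let segment_i := segment_i + 1
    let segment_indicies := segment_indicies.insert (PySem.Int.toStr segment_i) []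
    let segment_indicies := segment_indicies.modify (PySem.Int.toStr segment_i) [] (fun l => l ++ [row_i])
    (segment_i, segment_indicies)
  else
    (segment_i, segment_indicies.modify (PySem.Int.toStr segment_i) [] (fun l => l ++ [row_i]))

def seperate_jacobian_segments (dhp_matrix : List (List Int)) : List (String × List Int) :=
  let d_params : List Int := dhp_matrix.map (fun dhp_row => PySem.List.pyGetD dhp_row (-1) 0)
  ((PySem.List.pyRange 0 (PySem.List.len d_params) 1).foldl (pvStepA d_params)
    (0, PySem.Dict.empty)).2.items

-- ===== PORT B =====
def seperate_jacobian_segments_alt (dhp_matrix : List (List Int)) : List (String × List Int) :=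
  let d_params : List Int := dhp_matrix.map (fun dhp_row => PySem.List.pyGetD dhp_row (-1) 0)
  let n : Int := PySem.List.len d_params
  if n == 0 then []
  else
    let starts : List Int := (PySem.List.pyRange 0 n 1).filter
      (fun i => (i == 0) || !(PySem.List.pyGetD d_params i 0 == 0))
    (PySem.List.enumerate starts).map (fun p =>
      (PySem.Int.toStr p.1,
       PySem.List.pyRange p.2
         (if p.1 + 1 < PySem.List.len starts then PySem.List.pyGetD starts (p.1 + 1) 0 else n) 1))

-- ===== PRECONDITION & SPEC =====
-- Pre_ excludes matrices containing an empty row: there A's 'dhp_row[-1]' raises IndexError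
-- (and B raises the same way); on everything else A returns normally.
def Pre_seperate_jacobian_segments (dhp_matrix : List (List Int)) : Prop :=
  ∀ r ∈ dhp_matrix, r ≠ []
instance (dhp_matrix : List (List Int)) : Decidable (Pre_seperate_jacobian_segments dhp_matrix) := by
  unfold Pre_seperate_jacobian_segments; infer_instance

def pvWitness_seperate_jacobian_segments : List (List Int) := [[1], [2, 0], [0, 3], [4, 5]]

def Spec_seperate_jacobian_segments (dhp_matrix : List (List Int)) (out : List (String × List Int)) : Prop := out = seperate_jacobian_segments_alt dhp_matrix
instance (dhp_matrix : List (List Int)) (out : List (String × List Int)) : Decidable (Spec_seperate_jacobian_segments dhp_matrix out) := by unfold Spec_seperate_jacobian_segments; infer_instance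

-- ===== CLAIM (what is proved, stated in full; the proofs are below) =====
def Claim_equal_seperate_jacobian_segments : Prop := ∀ (dhp_matrix : List (List Int)), Dom_seperate_jacobian_segments dhp_matrix → Pre_seperate_jacobian_segments dhp_matrix → Spec_seperate_jacobian_segments dhp_matrix (seperate_jacobian_segments dhp_matrix)

-- ===== LEMMAS AND PROOFS =====

-- ---- str(n) is injective on the naturals ----

theorem pvDigitChar_inj {a b : Nat} (ha : a < 10) (hb : b < 10)
    (h : Nat.digitChar a = Nat.digitChar b) : a = b := by
  have key : ∀ x y : Fin 10, Nat.digitChar x.val = Nat.digitChar y.val → x = y := by decide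
  have := key ⟨a, ha⟩ ⟨b, hb⟩ h
  exact congrArg Fin.val this

theorem pvToDigitsCore_eq (f : Nat) : ∀ (n : Nat) (acc : List Char), 0 < n → n ≤ f →
    Nat.toDigitsCore 10 f n acc = ((Nat.digits 10 n).map Nat.digitChar).reverse ++ acc := by
  induction f with
  | zero => intro n acc h1 h2; omega
  | succ f ih =>
    intro n acc h1 h2
    rw [Nat.toDigitsCore]
    have hdig : Nat.digits 10 n = n % 10 :: Nat.digits 10 (n / 10) :=
      Nat.digits_def' (by norm_num) h1
    by_cases hq : n / 10 = 0
    · simp [hq, hdig]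
    · simp only [hq]
      have hlt : n / 10 ≤ f := by
        have : n / 10 < n := Nat.div_lt_self h1 (by norm_num)
        omega
      rw [ih (n / 10) _ (Nat.pos_of_ne_zero hq) hlt, hdig]
      simp

theorem pvToDigits10_inj {m n : Nat} (h : Nat.toDigits 10 m = Nat.toDigits 10 n) : m = n := by
  have expand : ∀ k : Nat, 0 < k →
      Nat.toDigits 10 k = ((Nat.digits 10 k).map Nat.digitChar).reverse := by
    intro k hk
    have := pvToDigitsCore_eq (k + 1) k [] hk (by omega)
    simpa [Nat.toDigits] using this
  have zero_case : ∀ k : Nat, 0 < k → Nat.toDigits 10 k ≠ ['0'] := by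
    intro k hk hEq
    rw [expand k hk] at hEq
    have : (Nat.digits 10 k).map Nat.digitChar = ['0'] := by
      have := congrArg List.reverse hEq; simpa using this
    obtain ⟨ds, hds, hmap⟩ : ∃ d, Nat.digits 10 k = [d] ∧ Nat.digitChar d = '0' := by
      cases hd : Nat.digits 10 k with
      | nil => rw [hd] at this; simp at this
      | cons x xs =>
        rw [hd] at this
        cases xs with
        | nil => simp at this; exact ⟨x, rfl, this⟩
        | cons y ys => simp at this
    have hx : ds < 10 := Nat.digits_lt_base (by norm_num) (by rw [hds]; simp)
    have : ds = 0 := pvDigitChar_inj hx (by norm_num) (by simpa using hmap)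
    subst this
    have : k = 0 := by
      have := Nat.ofDigits_digits 10 k
      rw [hds] at this
      simpa [Nat.ofDigits] using this.symm
    omega
  rcases Nat.eq_zero_or_pos m with hm | hm
  · rcases Nat.eq_zero_or_pos n with hn | hn
    · omega
    · subst hm
      exact absurd h.symm (by simpa using zero_case n hn)
  · rcases Nat.eq_zero_or_pos n with hn | hn
    · subst hn
      exact absurd h (by simpa using zero_case m hm)
    · rw [expand m hm, expand n hn] at h
      have hmap : (Nat.digits 10 m).map Nat.digitChar = (Nat.digits 10 n).map Nat.digitChar := by
        have := congrArg List.reverse h; simpa using this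
      have hdig : Nat.digits 10 m = Nat.digits 10 n := by
        have hall : ∀ (l1 l2 : List Nat), (∀ x ∈ l1, x < 10) → (∀ x ∈ l2, x < 10) →
            l1.map Nat.digitChar = l2.map Nat.digitChar → l1 = l2 := by
          intro l1
          induction l1 with
          | nil => intro l2 _ _ h; cases l2 <;> simp_all
          | cons x xs ih =>
            intro l2 h1 h2 h
            cases l2 with
            | nil => simp at h
            | cons y ys =>
              simp only [List.map_cons, List.cons.injEq] at h
              have hx := pvDigitChar_inj (h1 x (by simp)) (h2 y (by simp)) h.1
              have := ih ys (fun z hz => h1 z (by simp [hz])) (fun z hz => h2 z (by simp [hz])) h.2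
              simp [hx, this]
        exact hall _ _ (fun x hx => Nat.digits_lt_base (by norm_num) hx)
          (fun x hx => Nat.digits_lt_base (by norm_num) hx) hmap
      exact Nat.digits.injective 10 hdig

theorem pvToStr_nat_inj {a b : Nat} (h : PySem.Int.toStr (a : Int) = PySem.Int.toStr (b : Int)) :
    a = b := by
  have hc : PySem.Int.toChars (a : Int) = PySem.Int.toChars (b : Int) := by
    rw [← PySem.Int.toList_toStr, ← PySem.Int.toList_toStr, h]
  have ha : PySem.Int.toChars (a : Int) = Nat.toDigits 10 a := by
    simp [PySem.Int.toChars]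
  have hb : PySem.Int.toChars (b : Int) = Nat.toDigits 10 b := by
    simp [PySem.Int.toChars]
  exact pvToDigits10_inj (by rw [← ha, ← hb, hc])

-- ---- abstract grouping ----

def pvSnoc (gs : List (List Int)) (x : Int) : List (List Int) :=
  gs.dropLast ++ [(gs.getLast?.getD []) ++ [x]]

def pvG (d : List Int) : Nat → List (List Int)
  | 0 => []
  | Nat.succ m => if m = 0 then [[0]] else
      if d.getD m 0 ≠ 0 then pvG d m ++ [[(m : Int)]] else pvSnoc (pvG d m) (m : Int)

def pvEnumStr (gs : List (List Int)) : List (String × List Int) :=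
  (PySem.List.enumerate gs 0).map (fun p => (PySem.Int.toStr p.1, p.2))

theorem pvEnumStr_append_singleton (gs : List (List Int)) (g : List Int) :
    pvEnumStr (gs ++ [g]) = pvEnumStr gs ++ [(PySem.Int.toStr (gs.length : Int), g)] := by
  simp [pvEnumStr, PySem.List.enumerate_append, PySem.List.enumerate_cons]

theorem pvEnumStr_length (gs : List (List Int)) : (pvEnumStr gs).length = gs.length := by
  simp [pvEnumStr]

theorem pvEnumStr_keys (gs : List (List Int)) :
    (pvEnumStr gs).map (fun x => x.1)
      = (List.range gs.length).map (fun (j : Nat) => PySem.Int.toStr (j : Int)) := by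
  unfold pvEnumStr
  rw [List.map_map]
  have hfun : ((fun x : String × List Int => x.1) ∘ (fun p : Int × List Int => (PySem.Int.toStr p.1, p.2)))
      = (fun j => PySem.Int.toStr j) ∘ (fun p : Int × List Int => p.1) := rfl
  rw [hfun, ← List.map_map, PySem.List.map_fst_enumerate]
  rw [zero_add, PySem.List.pyRange_zero_nat, List.map_map]
  rfl

theorem pvMem_keys (gs : List (List Int)) (p : String × List Int) (hp : p ∈ pvEnumStr gs) :
    ∃ j : Nat, j < gs.length ∧ p.1 = PySem.Int.toStr (j : Int) := by
  have h1 : p.1 ∈ (pvEnumStr gs).map (fun x => x.1) := List.mem_map_of_mem hp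
  rw [pvEnumStr_keys] at h1
  obtain ⟨j, hj, hEq⟩ := List.mem_map.mp h1
  exact ⟨j, List.mem_range.mp hj, hEq.symm⟩

theorem pvNotMem (gs : List (List Int)) (k : Nat) (h : gs.length ≤ k) :
    ∀ p ∈ pvEnumStr gs, (p.1 == PySem.Int.toStr (k : Int)) = false := by
  intro p hp
  obtain ⟨j, hj, hEq⟩ := pvMem_keys gs p hp
  rw [hEq]
  simp only [beq_eq_false_iff_ne, ne_eq]
  intro hc
  have := pvToStr_nat_inj hc
  omega

theorem pvFresh (gs : List (List Int)) (k : Nat) (h : gs.length ≤ k) :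
    (PySem.Dict.mk (pvEnumStr gs)).contains (PySem.Int.toStr (k : Int)) = false := by
  unfold PySem.Dict.contains
  rw [List.any_eq_false]
  intro p hp
  have := pvNotMem gs k h p hp
  simp [this]

-- fresh-key insert followed by append-modify on that key appends a single entry
theorem pvPush (dct : PySem.Dict String (List Int)) (key : String) (x : Int)
    (h : dct.contains key = false) :
    ((dct.insert key []).modify key [] (fun l => l ++ [x]))
      = PySem.Dict.mk (dct.items ++ [(key, [x])]) := by
  have step : (dct.insert key []).modify key [] (fun l => l ++ [x]) = dct.insert key [x] := by
    unfold PySem.Dict.modify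
    rw [PySem.Dict.getD_insert_self, PySem.Dict.insert_insert_self]
    simp
  rw [step]
  apply PySem.Dict.ext
  rw [PySem.Dict.items_insert_of_not_contains dct [x] h]

-- append-modify on the key of the LAST entry of pvEnumStr gs is pvSnoc
theorem pvModLast (gs : List (List Int)) (x : Int) (h : gs ≠ []) :
    (PySem.Dict.mk (pvEnumStr gs)).modify (PySem.Int.toStr ((gs.length - 1 : Nat) : Int)) []
        (fun l => l ++ [x])
      = PySem.Dict.mk (pvEnumStr (pvSnoc gs x)) := by
  obtain ⟨init, lastg, hgs⟩ : ∃ init lastg, gs = init ++ [lastg] :=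
    ⟨gs.dropLast, gs.getLast h, (List.dropLast_append_getLast h).symm⟩
  subst hgs
  have hL : (init ++ [lastg]).length - 1 = init.length := by simp
  rw [hL]
  have hnot : ∀ p ∈ pvEnumStr init,
      (p.1 == PySem.Int.toStr (init.length : Int)) = false :=
    pvNotMem init init.length le_rfl
  have hEn : pvEnumStr (init ++ [lastg])
      = pvEnumStr init ++ [(PySem.Int.toStr (init.length : Int), lastg)] :=
    pvEnumStr_append_singleton init lastg
  have hfind : (pvEnumStr init
        ++ [(PySem.Int.toStr (init.length : Int), lastg)]).find?
          (fun p => p.1 == PySem.Int.toStr (init.length : Int))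
      = some (PySem.Int.toStr (init.length : Int), lastg) := by
    rw [List.find?_append]
    have h1 : (pvEnumStr init).find?
        (fun p => p.1 == PySem.Int.toStr (init.length : Int)) = none := by
      rw [List.find?_eq_none]
      intro p hp
      simp [hnot p hp]
    rw [h1]
    simp
  have hget : (PySem.Dict.mk (pvEnumStr (init ++ [lastg]))).getD
      (PySem.Int.toStr (init.length : Int)) [] = lastg := by
    unfold PySem.Dict.getD PySem.Dict.get?
    rw [hEn]
    rw [hfind]
    rfl
  have hcont : (PySem.Dict.mk (pvEnumStr (init ++ [lastg]))).contains
      (PySem.Int.toStr (init.length : Int)) = true := by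
    unfold PySem.Dict.contains
    rw [hEn]
    rw [List.any_append]
    simp
  unfold PySem.Dict.modify
  rw [hget]
  apply PySem.Dict.ext
  rw [PySem.Dict.items_insert_of_contains _ _ hcont]
  rw [hEn, List.map_append]
  have hmap1 : (pvEnumStr init).map
      (fun p => if (p.1 == PySem.Int.toStr (init.length : Int)) = true
        then (PySem.Int.toStr (init.length : Int), lastg ++ [x]) else p) = pvEnumStr init := by
    rw [List.map_congr_left (g := id), List.map_id]
    intro p hp
    simp [hnot p hp]
  rw [hmap1]
  have hsnoc : pvSnoc (init ++ [lastg]) x = init ++ [lastg ++ [x]] := by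
    unfold pvSnoc
    rw [List.dropLast_concat]
    simp
  rw [hsnoc, pvEnumStr_append_singleton]
  simp

theorem pvSnoc_length (gs : List (List Int)) (x : Int) (h : gs ≠ []) :
    (pvSnoc gs x).length = gs.length := by
  unfold pvSnoc
  simp only [List.length_append, List.length_dropLast, List.length_cons, List.length_nil]
  have : 1 ≤ gs.length := List.length_pos_of_ne_nil h
  omega

theorem pvG_ne_nil (d : List Int) (m : Nat) (h : 1 ≤ m) : pvG d m ≠ [] := by
  induction m with
  | zero => omega
  | succ m ih =>
    by_cases hm : m = 0
    · subst hm; simp [pvG]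
    · simp only [pvG, if_neg hm]
      split
      · exact List.append_ne_nil_of_right_ne_nil _ (by simp)
      · unfold pvSnoc; simp

theorem pvIntBeqZero (m : Nat) : (((m : Int)) == 0) = (m == 0) := by
  by_cases h : m = 0 <;> simp [h]

theorem pvFoldA (d : List Int) (m : Nat) (h : 1 ≤ m) :
    (PySem.List.pyRange 0 (m : Int) 1).foldl (pvStepA d) (0, PySem.Dict.empty)
      = (((pvG d m).length : Int) - 1, PySem.Dict.mk (pvEnumStr (pvG d m))) := by
  induction m with
  | zero => omega
  | succ m ih =>
    by_cases hm : m = 0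
    · subst hm
      have hr : PySem.List.pyRange 0 ((0 + 1 : Nat) : Int) 1 = [0] := by
        have := PySem.List.pyRange_one_singleton (0 : Int)
        norm_num at this ⊢
        exact this
      rw [hr]
      simp only [List.foldl_cons, List.foldl_nil]
      unfold pvStepA
      simp only [beq_self_eq_true, if_true, Bool.not_true, Bool.and_false,
        Bool.false_eq_true, if_false]
      rw [pvPush PySem.Dict.empty (PySem.Int.toStr 0) 0 (PySem.Dict.contains_empty _)]
      have hG1 : pvG d (0 + 1) = [[0]] := by simp [pvG]
      rw [hG1]
      simp [pvEnumStr, PySem.List.enumerate_cons, PySem.List.enumerate_nil,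
        PySem.Dict.empty]
    · have h1 : 1 ≤ m := Nat.one_le_iff_ne_zero.mpr hm
      have hr : PySem.List.pyRange 0 ((m + 1 : Nat) : Int) 1
          = PySem.List.pyRange 0 (m : Int) 1 ++ [(m : Int)] := by
        push_cast
        exact PySem.List.pyRange_one_succ_right (by positivity)
      rw [hr, List.foldl_append, ih h1]
      simp only [List.foldl_cons, List.foldl_nil]
      unfold pvStepA
      have hm0 : (((m : Int)) == 0) = false := by
        rw [pvIntBeqZero]; simp [hm]
      have hpy : PySem.List.pyGetD d ((m : Int)) 0 = d.getD m 0 :=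
        PySem.List.pyGetD_natCast d m 0
      set gs := pvG d m with hgs
      have hne : gs ≠ [] := pvG_ne_nil d m h1
      have hlenpos : 1 ≤ gs.length := List.length_pos_of_ne_nil hne
      by_cases hd : d.getD m 0 = 0
      · -- no new segment
        simp only [hm0, Bool.false_eq_true, if_false]
        rw [if_neg (by rw [hpy, hd]; simp)]
        have hcast : ((gs.length : Int) - 1) = (((gs.length - 1 : Nat)) : Int) := by
          push_cast [hlenpos]
          ring
        rw [hcast, pvModLast gs ((m : Int)) hne]
        have hG : pvG d (m + 1) = pvSnoc gs ((m : Int)) := by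
          rw [hgs]
          simp only [pvG]
          rw [if_neg hm, if_neg (not_not_intro hd)]
        rw [hG, pvSnoc_length gs _ hne, hcast]
      · -- new segment
        have hd' : ¬ d[m]?.getD 0 = 0 := by rw [← List.getD_eq_getElem?_getD]; exact hd
        simp only [hm0, Bool.false_eq_true, if_false]
        rw [if_pos (by rw [hpy]; simp [hd'])]
        have hcast : ((gs.length : Int) - 1) + 1 = ((gs.length : Nat) : Int) := by ring
        rw [hcast, pvPush (PySem.Dict.mk (pvEnumStr gs)) (PySem.Int.toStr (gs.length : Int))
          ((m : Int)) (pvFresh gs gs.length le_rfl)]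
        have hG : pvG d (m + 1) = gs ++ [[(m : Int)]] := by
          rw [hgs]
          simp only [pvG]
          rw [if_neg hm, if_pos hd]
        rw [hG]
        simp only [Prod.mk.injEq]
        constructor
        · simp only [List.length_append, List.length_cons, List.length_nil]
          push_cast
          ring
        · rw [pvEnumStr_append_singleton]

-- ---- B side ----

def pvStartsN (d : List Int) (m : Nat) : List Nat :=
  (List.range m).filter (fun i => i == 0 || !(d.getD i 0 == 0))

def pvBf (s : List Int) (n : Int) (p : Int × Int) : String × List Int :=
  (PySem.Int.toStr p.1,
   PySem.List.pyRange p.2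
     (if p.1 + 1 < (s.length : Int) then PySem.List.pyGetD s (p.1 + 1) 0 else n) 1)

def pvBm (d : List Int) (m : Nat) : List (String × List Int) :=
  (PySem.List.enumerate ((pvStartsN d m).map (fun (i : Nat) => (i : Int))) 0).map
    (pvBf ((pvStartsN d m).map (fun (i : Nat) => (i : Int))) (m : Int))

theorem pvStartsN_succ (d : List Int) (m : Nat) (h : 1 ≤ m) :
    pvStartsN d (m + 1)
      = pvStartsN d m ++ (if d.getD m 0 = 0 then [] else [m]) := by
  unfold pvStartsN
  rw [List.range_succ, List.filter_append]
  congr 1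
  have hm' : (m == 0) = false := by simp; omega
  rw [List.filter_cons, List.filter_nil]
  by_cases hd : d.getD m 0 = 0
  · have hd' : d[m]?.getD 0 = 0 := by rw [← List.getD_eq_getElem?_getD]; exact hd
    simp [hm', hd']
  · have hd' : ¬ d[m]?.getD 0 = 0 := by rw [← List.getD_eq_getElem?_getD]; exact hd
    simp [hm', hd']

theorem pvStartsN_ne_nil (d : List Int) (m : Nat) (h : 1 ≤ m) : pvStartsN d m ≠ [] := by
  apply List.ne_nil_of_mem (a := 0)
  unfold pvStartsN
  rw [List.mem_filter]
  constructor
  · rw [List.mem_range]; omega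
  · simp

theorem pvStartsN_lt (d : List Int) (m : Nat) : ∀ i ∈ pvStartsN d m, i < m := by
  intro i hi
  unfold pvStartsN at hi
  rw [List.mem_filter] at hi
  exact List.mem_range.mp hi.1

theorem pvGB (d : List Int) (m : Nat) (h : 1 ≤ m) : pvEnumStr (pvG d m) = pvBm d m := by
  induction m with
  | zero => omega
  | succ m ih =>
    by_cases hm : m = 0
    · subst hm
      have hs : pvStartsN d (0 + 1) = [0] := by
        unfold pvStartsN
        simp
      have hG : pvG d (0 + 1) = [[0]] := by simp [pvG]
      have h01 : PySem.List.pyRange 0 1 1 = [0] := by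
        have := PySem.List.pyRange_one_singleton (0 : Int)
        norm_num at this
        exact this
      rw [hG]
      unfold pvBm
      rw [hs]
      simp only [List.map_cons, List.map_nil, PySem.List.enumerate_cons,
        PySem.List.enumerate_nil, Nat.cast_zero]
      unfold pvEnumStr pvBf
      simp only [List.map_cons, List.map_nil, PySem.List.enumerate_cons,
        PySem.List.enumerate_nil]
      norm_num [h01]
    · have h1 : 1 ≤ m := Nat.one_le_iff_ne_zero.mpr hm
      have hIH := ih h1
      set s : List Int := (pvStartsN d m).map (fun (i : Nat) => (i : Int)) with hsDef
      set gs := pvG d m with hgsDef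
      have hne : gs ≠ [] := pvG_ne_nil d m h1
      have hsne : s ≠ [] := by
        simp only [hsDef, ne_eq, List.map_eq_nil_iff]
        exact pvStartsN_ne_nil d m h1
      have hlen_gs_s : gs.length = s.length := by
        have h2 := congrArg List.length hIH
        rw [pvEnumStr_length] at h2
        rw [h2]
        simp [pvBm, hsDef, PySem.List.length_enumerate]
      by_cases hd : d.getD m 0 = 0
      · -- last segment grows
        have hd' : d[m]?.getD 0 = 0 := by rw [← List.getD_eq_getElem?_getD]; exact hd
        have hsucc : pvStartsN d (m + 1) = pvStartsN d m := by
          rw [pvStartsN_succ d m h1, if_pos hd]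
          simp
        obtain ⟨init, lastg, hgsEq⟩ : ∃ init lastg, gs = init ++ [lastg] :=
          ⟨gs.dropLast, gs.getLast hne, (List.dropLast_append_getLast hne).symm⟩
        obtain ⟨s0, t, hsEq⟩ : ∃ s0 t, s = s0 ++ [t] :=
          ⟨s.dropLast, s.getLast hsne, (List.dropLast_append_getLast hsne).symm⟩
        have hslen : s.length = s0.length + 1 := by rw [hsEq]; simp
        have hG : pvG d (m + 1) = init ++ [lastg ++ [(m : Int)]] := by
          have hG0 : pvG d (m + 1) = pvSnoc gs (m : Int) := by
            rw [hgsDef]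
            simp only [pvG]
            rw [if_neg hm, if_neg (not_not_intro hd)]
          rw [hG0, hgsEq]
          unfold pvSnoc
          rw [List.dropLast_concat]
          simp
        have hEnum : PySem.List.enumerate s 0
            = PySem.List.enumerate s0 0 ++ [((s0.length : Int), t)] := by
          rw [hsEq, PySem.List.enumerate_append]
          simp [PySem.List.enumerate_cons]
        have hprefix_eq : ∀ p ∈ PySem.List.enumerate s0 0,
            pvBf s (m : Int) p = pvBf s ((m + 1 : Nat) : Int) p := by
          intro p hp
          obtain ⟨k, hk, hpEq⟩ := (PySem.List.mem_enumerate_iff s0 0 p).mp hp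
          have hplt : p.1 + 1 < (s.length : Int) := by
            rw [hpEq, hslen]
            push_cast
            omega
          unfold pvBf
          rw [if_pos hplt, if_pos hplt]
        have hlast_m : pvBf s (m : Int) ((s0.length : Int), t)
            = (PySem.Int.toStr (s0.length : Int), PySem.List.pyRange t (m : Int) 1) := by
          unfold pvBf
          rw [if_neg (by rw [hslen]; push_cast; omega)]
        have hlast_m1 : pvBf s ((m + 1 : Nat) : Int) ((s0.length : Int), t)
            = (PySem.Int.toStr (s0.length : Int), PySem.List.pyRange t ((m + 1 : Nat) : Int) 1) := by
          unfold pvBf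
          rw [if_neg (by rw [hslen]; push_cast; omega)]
        have ht_le : t ≤ (m : Int) := by
          have htm : t ∈ s := by rw [hsEq]; simp
          rw [hsDef] at htm
          obtain ⟨i, hi, hiEq⟩ := List.mem_map.mp htm
          have := pvStartsN_lt d m i hi
          omega
        have hIH' : pvEnumStr init ++ [(PySem.Int.toStr (init.length : Int), lastg)]
            = (PySem.List.enumerate s0 0).map (pvBf s (m : Int))
              ++ [(PySem.Int.toStr (s0.length : Int), PySem.List.pyRange t (m : Int) 1)] := by
          have hthis := hIH
          rw [hgsEq, pvEnumStr_append_singleton] at hthis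
          rw [hthis]
          unfold pvBm
          rw [← hsDef, hEnum, List.map_append]
          simp [hlast_m]
        have hinj := List.append_inj' hIH' (by simp)
        have hpre := hinj.1
        have hl : (PySem.Int.toStr (init.length : Int), lastg)
            = (PySem.Int.toStr (s0.length : Int), PySem.List.pyRange t (m : Int) 1) := by
          have h2 := hinj.2
          simpa using h2
        rw [hG, pvEnumStr_append_singleton]
        unfold pvBm
        rw [hsucc, ← hsDef, hEnum, List.map_append]
        have hmap : (PySem.List.enumerate s0 0).map (pvBf s ((m + 1 : Nat) : Int))
            = (PySem.List.enumerate s0 0).map (pvBf s (m : Int)) :=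
          (List.map_congr_left (fun p hp => (hprefix_eq p hp).symm))
        rw [hmap, ← hpre]
        have hrange : PySem.List.pyRange t ((m + 1 : Nat) : Int) 1
            = PySem.List.pyRange t (m : Int) 1 ++ [(m : Int)] := by
          push_cast
          exact PySem.List.pyRange_one_succ_right ht_le
        simp only [List.map_cons, List.map_nil, hlast_m1, hrange]
        have hlen_init : init.length = s0.length := by
          have h3 : gs.length = s.length := hlen_gs_s
          rw [hgsEq, hsEq] at h3
          simpa using h3
        have hlastg : lastg = PySem.List.pyRange t (m : Int) 1 := congrArg Prod.snd hl
        rw [hlen_init, hlastg]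
      · -- new segment
        have hd' : ¬ d[m]?.getD 0 = 0 := by rw [← List.getD_eq_getElem?_getD]; exact hd
        have hsucc : pvStartsN d (m + 1) = pvStartsN d m ++ [m] := by
          rw [pvStartsN_succ d m h1, if_neg hd]
        have hG : pvG d (m + 1) = gs ++ [[(m : Int)]] := by
          rw [hgsDef]
          simp only [pvG]
          rw [if_neg hm, if_pos hd]
        have hs' : (pvStartsN d (m + 1)).map (fun (i : Nat) => (i : Int))
            = s ++ [(m : Int)] := by
          rw [hsucc, List.map_append, ← hsDef]
          simp
        have hEnum : PySem.List.enumerate (s ++ [(m : Int)]) 0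
            = PySem.List.enumerate s 0 ++ [((s.length : Int), (m : Int))] := by
          rw [PySem.List.enumerate_append]
          simp [PySem.List.enumerate_cons]
        have hprefix_eq : ∀ p ∈ PySem.List.enumerate s 0,
            pvBf s (m : Int) p = pvBf (s ++ [(m : Int)]) ((m + 1 : Nat) : Int) p := by
          intro p hp
          obtain ⟨k, hk, hpEq⟩ := (PySem.List.mem_enumerate_iff s 0 p).mp hp
          have hslen : (s ++ [(m : Int)]).length = s.length + 1 := by simp
          unfold pvBf
          by_cases hkk : k + 1 < s.length
          · have hc1 : p.1 + 1 < (s.length : Int) := by rw [hpEq]; push_cast; omega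
            have hc2 : p.1 + 1 < (((s ++ [(m : Int)]).length : Nat) : Int) := by
              rw [hpEq, hslen]; push_cast; omega
            rw [if_pos hc1, if_pos hc2]
            have hcast : p.1 + 1 = ((k + 1 : Nat) : Int) := by rw [hpEq]; push_cast; ring
            rw [hcast, PySem.List.pyGetD_natCast, PySem.List.pyGetD_natCast]
            rw [List.getD_append _ _ _ _ hkk]
          · have hkEq : k + 1 = s.length := by omega
            have hc1 : ¬ (p.1 + 1 < (s.length : Int)) := by rw [hpEq]; push_cast; omega
            have hc2 : p.1 + 1 < (((s ++ [(m : Int)]).length : Nat) : Int) := by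
              rw [hpEq, hslen]; push_cast; omega
            rw [if_neg hc1, if_pos hc2]
            have hcast : p.1 + 1 = ((k + 1 : Nat) : Int) := by rw [hpEq]; push_cast; ring
            rw [hcast, PySem.List.pyGetD_natCast, hkEq]
            rw [List.getD_append_right _ _ _ _ (le_refl _)]
            simp
        have hlast : pvBf (s ++ [(m : Int)]) ((m + 1 : Nat) : Int) ((s.length : Int), (m : Int))
            = (PySem.Int.toStr (s.length : Int), [(m : Int)]) := by
          unfold pvBf
          have hslen : (s ++ [(m : Int)]).length = s.length + 1 := by simp
          rw [if_neg (by rw [hslen]; push_cast; omega)]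
          have hsing : PySem.List.pyRange (m : Int) ((m + 1 : Nat) : Int) 1 = [(m : Int)] := by
            push_cast
            exact PySem.List.pyRange_one_singleton (m : Int)
          rw [hsing]
        rw [hG, pvEnumStr_append_singleton]
        unfold pvBm
        rw [hs', hEnum, List.map_append]
        have hmap : (PySem.List.enumerate s 0).map (pvBf (s ++ [(m : Int)]) ((m + 1 : Nat) : Int))
            = (PySem.List.enumerate s 0).map (pvBf s (m : Int)) :=
          (List.map_congr_left (fun p hp => (hprefix_eq p hp).symm))
        rw [hmap]
        have hIH' : pvEnumStr gs = (PySem.List.enumerate s 0).map (pvBf s (m : Int)) := by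
          rw [hIH]; unfold pvBm; rw [← hsDef]
        rw [← hIH']
        simp only [List.map_cons, List.map_nil, hlast]
        rw [hlen_gs_s]

theorem pvA_eq (d : List Int) :
    ((PySem.List.pyRange 0 (PySem.List.len d) 1).foldl (pvStepA d) (0, PySem.Dict.empty)).2.items
      = (if (PySem.List.len d == 0) then []
         else pvBm d d.length) := by
  rw [PySem.List.len_eq]
  rcases Nat.eq_zero_or_pos d.length with h0 | hpos
  · rw [h0]
    simp [PySem.Dict.empty]
  · have hne : (((d.length : Int)) == 0) = false := by
      have hz : d.length ≠ 0 := by omega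
      simp [pvIntBeqZero, hz]
    rw [hne]
    simp only [Bool.false_eq_true, if_false]
    rw [pvFoldA d d.length hpos]
    exact pvGB d d.length hpos

theorem pvB_eq (d : List Int) :
    (if (PySem.List.len d == 0) = true then ([] : List (String × List Int))
     else
       (PySem.List.enumerate ((PySem.List.pyRange 0 (PySem.List.len d) 1).filter
           (fun i => (i == 0) || !(PySem.List.pyGetD d i 0 == 0)))).map (fun p =>
         (PySem.Int.toStr p.1,
          PySem.List.pyRange p.2
            (if p.1 + 1 < PySem.List.len ((PySem.List.pyRange 0 (PySem.List.len d) 1).filter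
                 (fun i => (i == 0) || !(PySem.List.pyGetD d i 0 == 0)))
             then PySem.List.pyGetD ((PySem.List.pyRange 0 (PySem.List.len d) 1).filter
                 (fun i => (i == 0) || !(PySem.List.pyGetD d i 0 == 0))) (p.1 + 1) 0
             else PySem.List.len d) 1)))
      = (if (PySem.List.len d == 0) then [] else pvBm d d.length) := by
  rw [PySem.List.len_eq]
  rcases Nat.eq_zero_or_pos d.length with h0 | hpos
  · rw [h0]; simp
  · have hne : (((d.length : Int)) == 0) = false := by
      have hz : d.length ≠ 0 := by omega
      simp [pvIntBeqZero, hz]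
    rw [hne]
    simp only [Bool.false_eq_true, if_false]
    have hst : (PySem.List.pyRange 0 ((d.length : Nat) : Int) 1).filter
        (fun i => (i == 0) || !(PySem.List.pyGetD d i 0 == 0))
        = (pvStartsN d d.length).map (fun (i : Nat) => (i : Int)) := by
      rw [PySem.List.pyRange_zero_nat, List.filter_map]
      unfold pvStartsN
      congr 1
      apply List.filter_congr
      intro i _
      simp only [Function.comp_apply, PySem.List.pyGetD_natCast, pvIntBeqZero]
    rw [hst]
    unfold pvBm
    apply List.map_congr_left
    intro p hp
    unfold pvBf
    rw [PySem.List.len_eq]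

-- ===== VERDICT (by name: the statement is the Claim_ definition above) =====
theorem seperate_jacobian_segments_spec : Claim_equal_seperate_jacobian_segments := by
  intro dhp_matrix _ _
  unfold Spec_seperate_jacobian_segments
  unfold seperate_jacobian_segments seperate_jacobian_segments_alt
  rw [pvA_eq, ← pvB_eq]
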